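-- pv_equiv track=rewrite | github.com/prashmohan/SensorDB | models/solar.py | mapDay
-- ===== SOURCE A (Python) =====
-- months    = ['jan', 'feb', 'mar', 'apr', 'may', 'jun', 'jul', 'aug', 'sep', 'oct', 'nov', 'dec']
--
-- monthDays = [31, 28, 31, 30, 31, 30, 31, 31, 30, 31, 30, 31]
--
-- def mapDay(month,day):
--     """
--     Map a month and day of month to year day.
--     """
--     yday = 0
--     for mon in range(0,12):
--         if month == months[mon] :
--             if day > monthDays[mon] : return -1
--             return yday+day
--         yday = yday + monthDays[mon]
--     return -1
-- ===== SOURCE B (Python) =====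
-- # Tableless re-implementation: locate the month by searching one packed 36-char
-- # string (aligned 3-char slot), then compute day-of-year with a closed-form
-- # cumulative-days formula instead of any per-month day table or scan.
--
-- _S = 'janfebmaraprmayjunjulaugsepoctnovdec'
--
-- def _cum(m):
--     # Days before month m (1-based, non-leap year), valid for m = 1..13.
--     return (367 * m - 362) // 12 - (0 if m <= 2 else 2)
--
-- def mapDay(month, day):
--     """
--     Map a month and day of month to year day.
--     """
--     i = _S.find(month)
--     if len(month) != 3 or i < 0 or i % 3 != 0:
--         return -1
--     m = i // 3 + 1
--     if day > _cum(m + 1) - _cum(m):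
--         return -1
--     return _cum(m) + day
-- ===== Notes on version B (the rewrite author's own statement) =====
-- stated objective: alternative
-- what changed: Removed both per-month tables: B locates the month as an aligned 3-char slot of one packed 'janfeb...dec' string and computes the offset and month length from a closed-form cumulative-days formula ((367*m-362)//12 with a 2-day correction past February), instead of A's accumulating scan over parallel name/day lists.
import Mathlib
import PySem

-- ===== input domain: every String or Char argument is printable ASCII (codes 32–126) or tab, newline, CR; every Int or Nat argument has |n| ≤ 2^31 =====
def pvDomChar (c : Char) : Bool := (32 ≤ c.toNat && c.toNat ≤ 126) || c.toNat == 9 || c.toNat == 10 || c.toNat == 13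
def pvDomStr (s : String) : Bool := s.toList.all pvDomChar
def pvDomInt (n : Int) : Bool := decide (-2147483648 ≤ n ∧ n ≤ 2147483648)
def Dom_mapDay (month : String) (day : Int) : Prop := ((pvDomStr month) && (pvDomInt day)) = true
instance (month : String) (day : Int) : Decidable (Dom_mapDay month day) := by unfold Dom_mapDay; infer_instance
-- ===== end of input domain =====

-- B drops both per-month tables: it locates the month as an aligned 3-char slot of one
-- packed string and computes the day-of-year offset with a closed-form formula (alternative).

-- ===== PORT A =====
-- module-level lists of A
def monthsA : List String := ["jan", "feb", "mar", "apr", "may", "jun", "jul", "aug", "sep", "oct", "nov", "dec"]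
def monthDaysA : List Int := [31, 28, 31, 30, 31, 30, 31, 31, 30, 31, 30, 31]

-- the 'for mon in range(0,12)' loop with accumulator yday; pairs = months[mon..] zipped with monthDays[mon..]
def mapDayLoop (month : String) (day : Int) : List (String × Int) → Int → Int
  | [], _ => -1
  | (mon, md) :: rest, yday =>
    if month = mon then
      if day > md then -1 else yday + day
    else
      mapDayLoop month day rest (yday + md)

def mapDay (month : String) (day : Int) : Int :=
  mapDayLoop month day (monthsA.zip monthDaysA) 0

-- ===== PORT B =====
-- the packed month string 'janfebmar…dec' of Source B
def monthStrB : String := "janfebmaraprmayjunjulaugsepoctnovdec"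

-- _cum(m) = days before month m (1-based, non-leap), closed form, valid for m = 1..13
def cumB (m : Int) : Int :=
  PySem.Int.floordiv (367 * m - 362) 12 - (if m ≤ 2 then 0 else 2)

def mapDay_alt (month : String) (day : Int) : Int :=
  let i := PySem.Str.find monthStrB month
  if PySem.Str.len month ≠ 3 ∨ i < 0 ∨ PySem.Int.mod i 3 ≠ 0 then -1
  else
    let m := PySem.Int.floordiv i 3 + 1
    if day > cumB (m + 1) - cumB m then -1 else cumB m + day

-- ===== PRECONDITION & SPEC =====
def Spec_mapDay (month : String) (day : Int) (out : Int) : Prop := out = mapDay_alt month day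
instance (month : String) (day : Int) (out : Int) : Decidable (Spec_mapDay month day out) := by unfold Spec_mapDay; infer_instance

-- ===== CLAIM =====
def Claim_equal_mapDay : Prop := ∀ (month : String) (day : Int), Dom_mapDay month day → Spec_mapDay month day (mapDay month day)

-- ===== LEMMAS AND PROOFS =====

-- A's loop returns -1 when the month matches no listed name
lemma mapDayLoop_not_mem (month : String) (day : Int) :
    ∀ (ps : List (String × Int)) (y : Int), (∀ p ∈ ps, month ≠ p.1) → mapDayLoop month day ps y = -1 := by
  intro ps
  induction ps with
  | nil => intro y _; rfl
  | cons p rest ih =>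
    intro y h
    obtain ⟨mon, md⟩ := p
    have hne : month ≠ mon := h (mon, md) (List.mem_cons_self)
    simpa [mapDayLoop, hne] using ih (y + md) (fun q hq => h q (List.mem_cons_of_mem _ hq))

-- if month's 3 chars sit at an aligned offset of monthStrB, month is one of the 12 names
lemma month_mem_of_aligned (month : String)
    (hlen : month.toList.length = 3)
    (hge : 0 ≤ PySem.Str.find monthStrB month)
    (hmod : PySem.Int.mod (PySem.Str.find monthStrB month) 3 = 0) :
    month ∈ monthsA := by
  rw [PySem.Str.find_eq] at hge hmod
  obtain ⟨hpre, -⟩ := PySem.Chars.find_spec hge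
  have hle : PySem.Chars.find monthStrB.toList month.toList ≤ (36 : Int) := by
    simpa using PySem.Chars.find_le_length monthStrB.toList month.toList
  set i : Int := PySem.Chars.find monthStrB.toList month.toList with hi
  have hdvd : (3 : Int) ∣ i := (PySem.Int.mod_eq_zero_iff_dvd i 3).mp hmod
  have htake : month.toList = List.take 3 (List.drop i.toNat monthStrB.toList) := by
    have := List.prefix_iff_eq_take.mp hpre
    rwa [hlen] at this
  have hlen2 : month.toList.length ≤ (monthStrB.toList.drop i.toNat).length :=
    hpre.length_le
  have h33 : i.toNat ≤ 33 := by
    simp only [List.length_drop, hlen] at hlen2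
    have h36 : monthStrB.toList.length = 36 := by decide
    omega
  set n : Nat := i.toNat with hn
  have hdvd' : 3 ∣ n := by omega
  have hmk : month = String.ofList (List.take 3 (List.drop n monthStrB.toList)) :=
    String.toList_inj.mp (by simp [htake])
  rw [hmk]
  interval_cases n <;> first | omega | decide

-- per-month evaluation facts for B's closed form, plus the find values (by decide)
lemma mapDay_alt_eval (name : String) (k : Nat)
    (hfind : PySem.Str.find monthStrB name = 3 * k)
    (hlen : PySem.Str.len name = 3) (day : Int) :
    mapDay_alt name day =
      if day > cumB (k + 2) - cumB (k + 1) then -1 else cumB (k + 1) + day := by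
  have hmod : PySem.Int.mod ((3 : Int) * k) 3 = 0 := by
    simp [PySem.Int.mod]
  have hdiv : PySem.Int.floordiv ((3 : Int) * k) 3 = k := by
    simp [PySem.Int.floordiv]
  simp only [mapDay_alt, hfind, hlen, hmod, hdiv]
  have : ¬((3:Int) ≠ 3 ∨ (3:Int) * k < 0 ∨ (0:Int) ≠ 0) := by
    push Not; exact ⟨rfl, by positivity, rfl⟩
  rw [if_neg this]
  have h2 : (k : Int) + 1 + 1 = (k : Int) + 2 := by ring
  rw [h2]

-- B returns -1 whenever its guard fires
lemma mapDay_alt_guard (month : String) (day : Int)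
    (h : PySem.Str.len month ≠ 3 ∨ PySem.Str.find monthStrB month < 0 ∨
         PySem.Int.mod (PySem.Str.find monthStrB month) 3 ≠ 0) :
    mapDay_alt month day = -1 := by
  simp only [mapDay_alt]
  rw [if_pos h]

-- closed-form values of cumB used by the per-month cases
lemma cumB_1 : cumB 1 = 0 := by decide
lemma cumB_2 : cumB 2 = 31 := by decide
lemma cumB_3 : cumB 3 = 59 := by decide
lemma cumB_4 : cumB 4 = 90 := by decide
lemma cumB_5 : cumB 5 = 120 := by decide
lemma cumB_6 : cumB 6 = 151 := by decide
lemma cumB_7 : cumB 7 = 181 := by decide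
lemma cumB_8 : cumB 8 = 212 := by decide
lemma cumB_9 : cumB 9 = 243 := by decide
lemma cumB_10 : cumB 10 = 273 := by decide
lemma cumB_11 : cumB 11 = 304 := by decide
lemma cumB_12 : cumB 12 = 334 := by decide
lemma cumB_13 : cumB 13 = 365 := by decide

-- ===== VERDICT =====
theorem mapDay_spec : Claim_equal_mapDay := by
  intro month day _
  unfold Spec_mapDay
  by_cases hm : month ∈ monthsA
  · fin_cases hm
    · rw [mapDay_alt_eval "jan" 0 (by decide) (by decide) day]
      norm_num [mapDay, mapDayLoop, monthsA, monthDaysA, cumB_1, cumB_2]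
    · rw [mapDay_alt_eval "feb" 1 (by decide) (by decide) day]
      norm_num [mapDay, mapDayLoop, monthsA, monthDaysA, cumB_1, cumB_2, cumB_3, cumB_4, cumB_5, cumB_6, cumB_7, cumB_8, cumB_9, cumB_10, cumB_11, cumB_12, cumB_13]
      simp
    · rw [mapDay_alt_eval "mar" 2 (by decide) (by decide) day]
      norm_num [mapDay, mapDayLoop, monthsA, monthDaysA, cumB_1, cumB_2, cumB_3, cumB_4, cumB_5, cumB_6, cumB_7, cumB_8, cumB_9, cumB_10, cumB_11, cumB_12, cumB_13]
      simp
    · rw [mapDay_alt_eval "apr" 3 (by decide) (by decide) day]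
      norm_num [mapDay, mapDayLoop, monthsA, monthDaysA, cumB_1, cumB_2, cumB_3, cumB_4, cumB_5, cumB_6, cumB_7, cumB_8, cumB_9, cumB_10, cumB_11, cumB_12, cumB_13]
      simp
    · rw [mapDay_alt_eval "may" 4 (by decide) (by decide) day]
      norm_num [mapDay, mapDayLoop, monthsA, monthDaysA, cumB_1, cumB_2, cumB_3, cumB_4, cumB_5, cumB_6, cumB_7, cumB_8, cumB_9, cumB_10, cumB_11, cumB_12, cumB_13]
      simp
    · rw [mapDay_alt_eval "jun" 5 (by decide) (by decide) day]
      norm_num [mapDay, mapDayLoop, monthsA, monthDaysA, cumB_1, cumB_2, cumB_3, cumB_4, cumB_5, cumB_6, cumB_7, cumB_8, cumB_9, cumB_10, cumB_11, cumB_12, cumB_13]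
      simp
    · rw [mapDay_alt_eval "jul" 6 (by decide) (by decide) day]
      norm_num [mapDay, mapDayLoop, monthsA, monthDaysA, cumB_1, cumB_2, cumB_3, cumB_4, cumB_5, cumB_6, cumB_7, cumB_8, cumB_9, cumB_10, cumB_11, cumB_12, cumB_13]
      simp
    · rw [mapDay_alt_eval "aug" 7 (by decide) (by decide) day]
      norm_num [mapDay, mapDayLoop, monthsA, monthDaysA, cumB_1, cumB_2, cumB_3, cumB_4, cumB_5, cumB_6, cumB_7, cumB_8, cumB_9, cumB_10, cumB_11, cumB_12, cumB_13]
      simp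
    · rw [mapDay_alt_eval "sep" 8 (by decide) (by decide) day]
      norm_num [mapDay, mapDayLoop, monthsA, monthDaysA, cumB_1, cumB_2, cumB_3, cumB_4, cumB_5, cumB_6, cumB_7, cumB_8, cumB_9, cumB_10, cumB_11, cumB_12, cumB_13]
      simp
    · rw [mapDay_alt_eval "oct" 9 (by decide) (by decide) day]
      norm_num [mapDay, mapDayLoop, monthsA, monthDaysA, cumB_1, cumB_2, cumB_3, cumB_4, cumB_5, cumB_6, cumB_7, cumB_8, cumB_9, cumB_10, cumB_11, cumB_12, cumB_13]
      simp
    · rw [mapDay_alt_eval "nov" 10 (by decide) (by decide) day]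
      norm_num [mapDay, mapDayLoop, monthsA, monthDaysA, cumB_1, cumB_2, cumB_3, cumB_4, cumB_5, cumB_6, cumB_7, cumB_8, cumB_9, cumB_10, cumB_11, cumB_12, cumB_13]
      simp
    · rw [mapDay_alt_eval "dec" 11 (by decide) (by decide) day]
      norm_num [mapDay, mapDayLoop, monthsA, monthDaysA, cumB_1, cumB_2, cumB_3, cumB_4, cumB_5, cumB_6, cumB_7, cumB_8, cumB_9, cumB_10, cumB_11, cumB_12, cumB_13]
      simp
  · have hA : mapDay month day = -1 := by
      apply mapDayLoop_not_mem
      intro p hp hcontra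
      exact hm (hcontra ▸ (List.of_mem_zip hp).1)
    have hB : mapDay_alt month day = -1 := by
      by_cases hlen : PySem.Str.len month = 3
      · by_cases hge : (0 : Int) ≤ PySem.Str.find monthStrB month
        · by_cases hmod : PySem.Int.mod (PySem.Str.find monthStrB month) 3 = 0
          · exfalso
            apply hm
            have h3 : month.toList.length = 3 := by
              rw [String.length_toList]
              rw [PySem.Str.len_eq] at hlen
              exact_mod_cast hlen
            exact month_mem_of_aligned month h3 hge hmod
          · exact mapDay_alt_guard month day (Or.inr (Or.inr hmod))
        · exact mapDay_alt_guard month day (Or.inr (Or.inl (by omega)))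
      · exact mapDay_alt_guard month day (Or.inl hlen)
    rw [hA, hB]
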